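-- pv_equiv track=rewrite | github.com/tylerdennen/MOPE_lab6 | main.py | calcxi
-- ===== SOURCE A (Python) =====
-- def calcxi(n, listx):
--     sumxi = 0
--     for i in range(n):
--         lsumxi = 1
--         for j in range(len(listx)):
--             lsumxi *= listx[j][i]
--         sumxi += lsumxi
--     return sumxi
-- ===== SOURCE B (Python) =====
-- def calcxi(n, listx):
--     return sum(_colprods(n, listx))
--
-- def _colprods(n, rows):
--     # divide and conquer: column-product vector of a block of rows is the
--     # elementwise product of the vectors of its two halves
--     if len(rows) < 2:
--         if not rows:
--             return [1] * n
--         return [rows[0][i] for i in range(n)]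
--     half = len(rows) // 2
--     return [a * b for a, b in zip(_colprods(n, rows[:half]), _colprods(n, rows[half:]))]
-- ===== Notes on version B (the rewrite author's own statement) =====
-- stated objective: alternative
-- what changed: Divide-and-conquer: the column-product vector of the row block is computed recursively as the elementwise product (zip) of the vectors of the two halves of the rows, then summed once, instead of A's doubly-nested index loops that fully recompute each column product scalar by scalar.
import Mathlib
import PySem

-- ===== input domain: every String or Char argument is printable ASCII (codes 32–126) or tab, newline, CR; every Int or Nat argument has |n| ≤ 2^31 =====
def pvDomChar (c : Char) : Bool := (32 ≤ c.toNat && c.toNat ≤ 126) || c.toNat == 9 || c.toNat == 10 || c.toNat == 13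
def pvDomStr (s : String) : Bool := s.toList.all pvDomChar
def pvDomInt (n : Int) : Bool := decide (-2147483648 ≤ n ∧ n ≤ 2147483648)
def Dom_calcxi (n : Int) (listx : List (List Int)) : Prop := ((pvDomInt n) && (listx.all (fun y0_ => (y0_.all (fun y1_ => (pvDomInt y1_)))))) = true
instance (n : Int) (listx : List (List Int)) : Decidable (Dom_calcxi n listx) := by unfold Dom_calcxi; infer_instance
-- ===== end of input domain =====

-- B computes the column-product vector by divide-and-conquer on the rows (elementwise product of the two halves' vectors), then sums it; an alternative algorithm at the same cost as A's nested index loops.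


-- ===== PORT A =====
def calcxi (n : Int) (listx : List (List Int)) : Int :=
  (PySem.List.pyRange 0 n 1).foldl (fun sumxi i =>
    sumxi + (PySem.List.pyRange 0 (listx.length : Int) 1).foldl (fun lsumxi j =>
      lsumxi * PySem.List.pyGetD (PySem.List.pyGetD listx j []) i 0) 1) 0

-- ===== PORT B =====
-- _colprods from Source B; indexing via pyGetD (in range under Pre_)
def pvColprods (n : Int) (rows : List (List Int)) : List Int :=
  if rows.length < 2 then
    if rows.length = 0 then List.replicate n.toNat 1
    else (PySem.List.pyRange 0 n 1).map (fun i =>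
      PySem.List.pyGetD (PySem.List.pyGetD rows 0 []) i 0)
  else
    -- half = len(rows) // 2: Nat division equals Python // here since len ≥ 0
    List.zipWith (· * ·)
      (pvColprods n (PySem.List.slice rows none (some ((rows.length / 2 : Nat) : Int))))
      (pvColprods n (PySem.List.slice rows (some ((rows.length / 2 : Nat) : Int)) none))
termination_by rows.length
decreasing_by
  · rw [PySem.List.slice_to_natCast]; simp; omega
  · rw [PySem.List.slice_from_natCast]; simp; omega

def calcxi_alt (n : Int) (listx : List (List Int)) : Int :=
  (pvColprods n listx).sum

-- ===== PRECONDITION & SPEC =====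
-- Pre_ excludes exactly the inputs where the Python raises IndexError (some row shorter than n).
def Pre_calcxi (n : Int) (listx : List (List Int)) : Prop :=
  ∀ row ∈ listx, n ≤ (row.length : Int)
instance (n : Int) (listx : List (List Int)) : Decidable (Pre_calcxi n listx) := by unfold Pre_calcxi; infer_instance
def pvWitness_calcxi : Int × List (List Int) := (2, [[1, 2], [3, 4]])

def Spec_calcxi (n : Int) (listx : List (List Int)) (out : Int) : Prop := out = calcxi_alt n listx
instance (n : Int) (listx : List (List Int)) (out : Int) : Decidable (Spec_calcxi n listx out) := by unfold Spec_calcxi; infer_instance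

-- ===== CLAIM (what is proved, stated in full; the proofs are below) =====
def Claim_equal_calcxi : Prop := ∀ (n : Int) (listx : List (List Int)), Dom_calcxi n listx → Pre_calcxi n listx → Spec_calcxi n listx (calcxi n listx)

-- ===== LEMMAS AND PROOFS =====

-- the common normal form: the vector of column products over the first n.toNat columns
def pvP (n : Int) (rows : List (List Int)) : List Int :=
  (List.range n.toNat).map (fun i => (rows.map (fun r => r.getD i 0)).prod)

lemma pvP_append (n : Int) (xs ys : List (List Int)) :
    pvP n (xs ++ ys) = List.zipWith (· * ·) (pvP n xs) (pvP n ys) := by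
  unfold pvP
  apply List.ext_getElem
  · simp
  · intro i h1 h2
    simp

lemma pvColprods_eq (n : Int) (rows : List (List Int)) :
    pvColprods n rows = pvP n rows := by
  rw [pvColprods]
  split
  · split
    · rename_i h0
      have : rows = [] := List.length_eq_zero_iff.mp h0
      subst this
      simp [pvP, List.map_const']
    · rename_i hlt h0
      have h1 : rows.length = 1 := by omega
      obtain ⟨r, hr⟩ := List.length_eq_one_iff.mp h1
      subst hr
      simp [pvP, PySem.List.pyRange_one 0 n, List.map_map, Function.comp,
            PySem.List.pyGetD_zero_cons, PySem.List.pyGetD_natCast]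
  · rename_i h2
    have hh : rows.length / 2 < rows.length := by omega
    rw [PySem.List.slice_to_natCast, PySem.List.slice_from_natCast]
    rw [pvColprods_eq n (rows.take (rows.length / 2)),
        pvColprods_eq n (rows.drop (rows.length / 2))]
    rw [← pvP_append, List.take_append_drop]
termination_by rows.length
decreasing_by
  · simp; omega
  · simp; omega

-- A side's inner loop over row indices, as a fold over the rows themselves
lemma pv_inner_fold_eq (listx : List (List Int)) (i : Int) :
    (PySem.List.pyRange 0 (listx.length : Int) 1).foldl (fun lsumxi j =>
        lsumxi * PySem.List.pyGetD (PySem.List.pyGetD listx j []) i 0) 1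
      = listx.foldl (fun l row => l * PySem.List.pyGetD row i 0) 1 := by
  exact PySem.List.foldl_pyRange_zero_pyGetD listx [] (fun l row => l * PySem.List.pyGetD row i 0) 1

lemma pv_foldl_mul_eq_prod (listx : List (List Int)) (f : List Int → Int) :
    listx.foldl (fun l row => l * f row) 1 = (listx.map f).prod := by
  rw [List.prod_eq_foldl, ← List.foldl_map]

-- ===== VERDICT (by name: the statement is the Claim_ definition above) =====
theorem calcxi_spec : Claim_equal_calcxi := by
  intro n listx _ _
  unfold Spec_calcxi calcxi calcxi_alt
  rw [pvColprods_eq]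
  rw [PySem.List.foldl_add]
  rw [show PySem.List.pyRange 0 n 1 = (List.range (n - 0).toNat).map (fun (k : Nat) => (0 : Int) + k) from PySem.List.pyRange_one 0 n]
  simp only [List.map_map, Int.sub_zero, zero_add]
  unfold pvP
  apply congrArg
  apply List.map_congr_left
  intro k _
  simp only [Function.comp]
  rw [pv_inner_fold_eq, pv_foldl_mul_eq_prod]
  simp
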